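-- pv_equiv track=rewrite | github.com/JackWang0318/FNC-1_repos | feature_engineering.py | append_ngrams
-- ===== SOURCE A (Python) =====
-- def ngrams(input, n):
--     input = input.split(' ')
--     output = []
--     for i in range(len(input) - n + 1):
--         output.append(input[i:i + n])
--     return output
--
-- def append_ngrams(features, text_headline, text_body, size):
--     grams = [' '.join(x) for x in ngrams(text_headline, size)] #将headline标题文本转化为大小为size的n-gram
--     grams_hits = 0
--     grams_early_hits = 0
--     '''
--     统计n-gram在正文文本前255个字符中出现的次数是一种特征工程的技巧。
--     这个特定的操作可能是为了捕捉文本中一开始的关键信息或主题，因为文章的开头通常包含了文章的核心内容。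
--     通过关注文本开头的n-gram，我们可以更好地捕捉到标题和正文之间的相关性。
--     前置文本通常会提供关键信息或上下文，这些信息对于理解整个文本的含义和主题非常重要。
--     通过统计n-gram在文本前255个字符中的出现次数，我们可以对文章的开头部分进行更细致的分析
--     进而提高文本特征提取的质量和模型的性能。
--     '''
--     for gram in grams:
--         if gram in text_body:
--             grams_hits += 1
--         if gram in text_body[:255]:
--             grams_early_hits += 1
--     # 变量grams_hits和grams_early_hits，用于记录n-gram在正文文本中的命中次数和在正文文本前255个字符中的命中次数。
--     features.append(grams_hits)
--     features.append(grams_early_hits)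
--     return features
-- ===== SOURCE B (Python) =====
-- def append_ngrams(features, text_headline, text_body, size):
--     words = text_headline.split(' ')
--     grams = [' '.join(words[i:i + size]) for i in range(len(words) - size + 1)]
--     early_body = text_body[:255]
--     counts = {}
--     for g in grams:
--         counts[g] = counts.get(g, 0) + 1
--     grams_hits = 0
--     grams_early_hits = 0
--     for g, c in counts.items():
--         if g in early_body:           # a hit in the prefix is also a hit in the body
--             grams_hits += c
--             grams_early_hits += c
--         elif g in text_body:
--             grams_hits += c
--     features.append(grams_hits)
--     features.append(grams_early_hits)
--     return features
-- ===== Notes on version B (the rewrite author's own statement) =====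
-- stated objective: alternative
-- what changed: B builds a frequency dict of the headline n-grams and runs one substring test per DISTINCT gram (the body[:255] test subsumes the full-body test since the prefix hit implies a body hit), instead of A's two substring scans per gram occurrence.
import Mathlib
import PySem

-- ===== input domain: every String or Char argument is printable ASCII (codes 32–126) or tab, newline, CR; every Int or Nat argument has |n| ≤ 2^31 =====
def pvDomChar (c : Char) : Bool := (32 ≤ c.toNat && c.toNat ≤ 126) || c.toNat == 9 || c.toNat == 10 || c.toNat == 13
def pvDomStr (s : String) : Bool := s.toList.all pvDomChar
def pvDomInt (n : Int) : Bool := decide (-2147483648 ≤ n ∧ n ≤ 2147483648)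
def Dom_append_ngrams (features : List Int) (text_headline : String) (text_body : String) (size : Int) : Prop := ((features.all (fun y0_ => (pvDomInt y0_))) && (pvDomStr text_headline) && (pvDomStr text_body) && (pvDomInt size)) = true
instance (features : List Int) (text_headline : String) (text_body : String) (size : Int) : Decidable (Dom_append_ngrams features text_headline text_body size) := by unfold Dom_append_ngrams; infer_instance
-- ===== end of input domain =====

-- B counts each DISTINCT headline n-gram once via a frequency dict and uses that a hit in body[:255]
-- is already a hit in the body (one membership test per distinct gram); same return value as A.
-- Note: the Python A mutates `features` in place (append); B performs the same mutation, and the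
-- equivalence proved here is about the returned list.

-- ===== PORT A =====
def ngramsA (input : String) (n : Int) : List (List String) :=
  let input := (PySem.Str.split? input " ").getD []   -- sep " " ≠ "", so split? is always `some`
  (PySem.List.pyRange 0 ((input.length : Int) - n + 1) 1).foldl
    (fun output i => output ++ [PySem.List.slice input (some i) (some (i + n))]) []

def append_ngrams (features : List Int) (text_headline : String) (text_body : String) (size : Int) : List Int :=
  let grams := (ngramsA text_headline size).map (fun x => PySem.Str.join " " x)
  let r := grams.foldl
    (fun (acc : Int × Int) gram =>
      let acc1 := if PySem.Str.isIn gram text_body then (acc.1 + 1, acc.2) else acc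
      if PySem.Str.isIn gram (PySem.Str.slice text_body none (some 255)) then (acc1.1, acc1.2 + 1) else acc1)
    (0, 0)
  features ++ [r.1] ++ [r.2]

-- ===== PORT B =====
def append_ngrams_alt (features : List Int) (text_headline : String) (text_body : String) (size : Int) : List Int :=
  let words := (PySem.Str.split? text_headline " ").getD []
  let grams := (PySem.List.pyRange 0 ((words.length : Int) - size + 1) 1).map
    (fun i => PySem.Str.join " " (PySem.List.slice words (some i) (some (i + size))))
  let early_body := PySem.Str.slice text_body none (some 255)
  let counts := grams.foldl (fun (d : PySem.Dict String Int) g => d.insert g (d.getD g 0 + 1)) PySem.Dict.empty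
  let r := counts.items.foldl
    (fun (acc : Int × Int) gc =>
      if PySem.Str.isIn gc.1 early_body then (acc.1 + gc.2, acc.2 + gc.2)
      else if PySem.Str.isIn gc.1 text_body then (acc.1 + gc.2, acc.2)
      else acc)
    (0, 0)
  features ++ [r.1] ++ [r.2]

-- ===== PRECONDITION & SPEC =====
def Spec_append_ngrams (features : List Int) (text_headline : String) (text_body : String) (size : Int) (out : List Int) : Prop := out = append_ngrams_alt features text_headline text_body size
instance (features : List Int) (text_headline : String) (text_body : String) (size : Int) (out : List Int) : Decidable (Spec_append_ngrams features text_headline text_body size out) := by unfold Spec_append_ngrams; infer_instance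

-- ===== CLAIM (what is proved, stated in full; the proofs are below) =====
def Claim_equal_append_ngrams : Prop := ∀ (features : List Int) (text_headline : String) (text_body : String) (size : Int), Dom_append_ngrams features text_headline text_body size → Spec_append_ngrams features text_headline text_body size (append_ngrams features text_headline text_body size)

-- ===== LEMMAS AND PROOFS =====

-- a substring of body[:255] is a substring of body
theorem isIn_slice_imp (g text_body : String)
    (h : PySem.Str.isIn g (PySem.Str.slice text_body none (some 255)) = true) :
    PySem.Str.isIn g text_body = true := by
  rw [PySem.Str.isIn_iff_infix] at h ⊢
  rw [PySem.Str.toList_slice, PySem.Chars.slice_eq_listSlice,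
      PySem.List.slice_to _ (by norm_num : (0:Int) ≤ 255)] at h
  exact h.trans (List.take_prefix _ _).isInfix

-- the sum of per-distinct-element counts filtered by P is a countP over the whole list
theorem sum_ofList_count (gs : List String) (P : String → Bool) :
    ((PySem.Set.ofList gs).map (fun k => if P k then (gs.count k : Int) else 0)).sum
      = (gs.countP P : Int) := by
  have h1 : ((PySem.Set.ofList gs).map (fun k => if P k then (gs.count k : Int) else 0)).sum
      = ∑ a ∈ (PySem.Set.ofList gs : List String).toFinset, (if P a then (gs.count a : Int) else 0) :=
    Eq.symm (List.sum_toFinset _ (PySem.Set.nodup_ofList gs))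
  have h2 : (PySem.Set.ofList gs : List String).toFinset = gs.toFinset := by
    ext a; simp [List.mem_toFinset, PySem.Set.mem_ofList]
  have h3 : (gs.map (fun x => if P x then (1:Int) else 0)).sum = (gs.countP P : Int) :=
    PySem.List.sum_map_ite_one_zero P gs
  rw [h1, h2, ← h3, Finset.sum_list_map_count]
  apply Finset.sum_congr rfl
  intro m _
  by_cases h : P m <;> simp [h]

-- A's two-counter loop over the grams computes (countP p, countP q)
theorem foldA_gen {α : Type} (p q : α → Bool) (l : List α) (a b : Int) :
    l.foldl
      (fun (acc : Int × Int) gram =>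
        let acc1 := if p gram then (acc.1 + 1, acc.2) else acc
        if q gram then (acc1.1, acc1.2 + 1) else acc1)
      (a, b)
    = (a + (l.countP p : Int), b + (l.countP q : Int)) := by
  induction l generalizing a b with
  | nil => simp
  | cons x xs ih =>
    simp only [List.foldl_cons, List.countP_cons]
    by_cases h1 : p x <;> by_cases h2 : q x <;>
      simp only [h1, h2, if_true, ih] <;>
      refine Prod.ext ?_ ?_ <;> simp <;> ring

-- B's loop over the (gram, multiplicity) items computes the same pair, provided q implies p
theorem foldB_gen {α : Type} (p q : α → Bool) (himp : ∀ g, q g = true → p g = true)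
    (items : List (α × Int)) (a b : Int) :
    items.foldl
      (fun (acc : Int × Int) gc =>
        if q gc.1 then (acc.1 + gc.2, acc.2 + gc.2)
        else if p gc.1 then (acc.1 + gc.2, acc.2)
        else acc)
      (a, b)
    = (a + (items.map (fun gc => if p gc.1 then gc.2 else 0)).sum,
       b + (items.map (fun gc => if q gc.1 then gc.2 else 0)).sum) := by
  induction items generalizing a b with
  | nil => simp
  | cons x xs ih =>
    simp only [List.foldl_cons, List.map_cons, List.sum_cons]
    by_cases h2 : q x.1
    · have h1 := himp x.1 h2
      simp only [h1, h2, if_true, ih]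
      refine Prod.ext ?_ ?_ <;> simp <;> ring
    · by_cases h1 : p x.1 <;>
        simp only [h1, h2, if_true, ih] <;> (refine Prod.ext ?_ ?_ <;> simp <;> ring)

-- both ports build the same gram list from the same word list
theorem grams_eq (text_headline : String) (size : Int) :
    (ngramsA text_headline size).map (fun x => PySem.Str.join " " x)
    = (PySem.List.pyRange 0 ((((PySem.Str.split? text_headline " ").getD []).length : Int) - size + 1) 1).map
        (fun i => PySem.Str.join " " (PySem.List.slice ((PySem.Str.split? text_headline " ").getD []) (some i) (some (i + size)))) := by
  unfold ngramsA
  rw [PySem.List.foldl_append_singleton_eq_map]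
  simp [List.map_map]

-- the counter items of a list, filtered on membership in `tb` and summed, count the whole list
theorem items_counter_sum (gs : List String) (tb : String) :
    (((PySem.Dict.counter gs).items).map
        (fun gc => if PySem.Str.isIn gc.1 tb then gc.2 else 0)).sum
      = (gs.countP (fun g => PySem.Str.isIn g tb) : Int) := by
  rw [PySem.Dict.items_counter, List.map_map]
  exact sum_ofList_count gs (fun g => PySem.Str.isIn g tb)

-- ===== VERDICT (by name: the statement is the Claim_ definition above) =====
theorem append_ngrams_spec : Claim_equal_append_ngrams := by
  intro features text_headline text_body size _
  unfold Spec_append_ngrams append_ngrams append_ngrams_alt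
  simp only [grams_eq, PySem.Dict.foldl_insert_getD_add_one_eq_counter]
  rw [foldA_gen (fun g => PySem.Str.isIn g text_body)
        (fun g => PySem.Str.isIn g (PySem.Str.slice text_body none (some 255))),
      foldB_gen (fun g => PySem.Str.isIn g text_body)
        (fun g => PySem.Str.isIn g (PySem.Str.slice text_body none (some 255)))
        (fun g => isIn_slice_imp g text_body),
      items_counter_sum _ text_body,
      items_counter_sum _ (PySem.Str.slice text_body none (some 255))]
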